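-- pv_equiv track=rewrite | github.com/DeadManOfficial/BlackBox | modules/command/intelligence_analyzer.py | extract_techniques
-- ===== SOURCE A (Python) =====
-- from collections import defaultdict
--
-- def extract_techniques(content):
--     """Extract bot bypass and scraping techniques"""
--     techniques = defaultdict(list)
--
--     # Cloudflare bypass keywords
--     if any(kw in content.lower() for kw in ['cloudflare', 'cf-', 'challenge']):
--         cf_techs = []
--         if 'cloudscraper' in content.lower():
--             cf_techs.append('CloudScraper library')
--         if 'undetected' in content.lower():
--             cf_techs.append('Undetected ChromeDriver')
--         if 'tls' in content.lower() and 'fingerprint' in content.lower():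
--             cf_techs.append('TLS fingerprint spoofing')
--         if cf_techs:
--             techniques['cloudflare_bypass'] = cf_techs
--
--     # Bot detection bypass
--     if any(kw in content.lower() for kw in ['bot detection', 'anti-bot', 'fingerprint']):
--         bot_techs = []
--         if 'user-agent' in content.lower():
--             bot_techs.append('User-Agent rotation')
--         if 'headless' in content.lower():
--             bot_techs.append('Headless detection bypass')
--         if 'webdriver' in content.lower():
--             bot_techs.append('WebDriver property hiding')
--         if bot_techs:
--             techniques['bot_detection_bypass'] = bot_techs
--
--     # Proxy techniques
--     if 'proxy' in content.lower():
--         proxy_techs = []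
--         if 'residential' in content.lower():
--             proxy_techs.append('Residential proxies')
--         if 'rotation' in content.lower():
--             proxy_techs.append('Proxy rotation')
--         if 'tor' in content.lower():
--             proxy_techs.append('TOR network')
--         if proxy_techs:
--             techniques['proxy_methods'] = proxy_techs
--
--     # CAPTCHA solving
--     if 'captcha' in content.lower():
--         captcha_techs = []
--         if '2captcha' in content.lower() or 'anticaptcha' in content.lower():
--             captcha_techs.append('CAPTCHA solving services')
--         if 'recaptcha' in content.lower():
--             captcha_techs.append('reCAPTCHA bypass')
--         if captcha_techs:
--             techniques['captcha_solving'] = captcha_techs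
--
--     return techniques
-- ===== SOURCE B (Python) =====
-- from collections import defaultdict
--
-- # All keywords the analyzer ever looks for.
-- _KEYWORDS = ('cloudflare', 'cf-', 'challenge', 'cloudscraper', 'undetected',
--              'tls', 'fingerprint', 'bot detection', 'anti-bot', 'user-agent',
--              'headless', 'webdriver', 'proxy', 'residential', 'rotation',
--              'tor', 'captcha', '2captcha', 'anticaptcha', 'recaptcha')
--
-- # Categories: (result key, gate keywords (any), rules as (label, CNF keyword groups)).
-- _RULES = [
--     ('cloudflare_bypass', ('cloudflare', 'cf-', 'challenge'), [
--         ('CloudScraper library', (('cloudscraper',),)),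
--         ('Undetected ChromeDriver', (('undetected',),)),
--         ('TLS fingerprint spoofing', (('tls',), ('fingerprint',))),
--     ]),
--     ('bot_detection_bypass', ('bot detection', 'anti-bot', 'fingerprint'), [
--         ('User-Agent rotation', (('user-agent',),)),
--         ('Headless detection bypass', (('headless',),)),
--         ('WebDriver property hiding', (('webdriver',),)),
--     ]),
--     ('proxy_methods', ('proxy',), [
--         ('Residential proxies', (('residential',),)),
--         ('Proxy rotation', (('rotation',),)),
--         ('TOR network', (('tor',),)),
--     ]),
--     ('captcha_solving', ('captcha',), [
--         ('CAPTCHA solving services', (('2captcha', 'anticaptcha'),)),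
--         ('reCAPTCHA bypass', (('recaptcha',),)),
--     ]),
-- ]
--
--
-- def extract_techniques(content):
--     """Extract bot bypass and scraping techniques.
--
--     Single left-to-right sweep of the text: at each position, record every
--     keyword that starts there (a multi-pattern match), then assemble the
--     result purely from the found-keyword set via the declarative rule table.
--     """
--     text = content.lower()
--     found = set()
--     for i in range(len(text) + 1):
--         for kw in _KEYWORDS:
--             if kw not in found and text.startswith(kw, i):
--                 found.add(kw)
--     techniques = defaultdict(list)
--     for key, gate, rules in _RULES:
--         if any(kw in found for kw in gate):
--             labels = [label for label, groups in rules
--                       if all(any(kw in found for kw in group) for group in groups)]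
--             if labels:
--                 techniques[key] = labels
--     return techniques
-- ===== Notes on version B (the rewrite author's own statement) =====
-- stated objective: alternative
-- what changed: Instead of A's per-keyword substring searches (re-lowering the text for every test), B lowers once and makes a single left-to-right sweep over the text positions matching all 20 keywords simultaneously into a found-set, then assembles the result from that set via a declarative rule table.
import Mathlib
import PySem

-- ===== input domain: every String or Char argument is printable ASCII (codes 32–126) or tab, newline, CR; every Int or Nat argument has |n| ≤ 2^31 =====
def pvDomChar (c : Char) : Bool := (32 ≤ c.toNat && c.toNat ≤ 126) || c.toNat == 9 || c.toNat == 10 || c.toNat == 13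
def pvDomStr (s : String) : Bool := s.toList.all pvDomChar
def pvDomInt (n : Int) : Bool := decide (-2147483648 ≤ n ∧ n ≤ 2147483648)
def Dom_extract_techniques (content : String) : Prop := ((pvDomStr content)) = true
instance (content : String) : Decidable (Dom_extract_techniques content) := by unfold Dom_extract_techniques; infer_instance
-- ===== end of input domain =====

-- B replaces A's per-keyword substring tests (each re-lowering the text) by one
-- left-to-right sweep matching all keywords into a found-set, then a rule-table
-- assembly (objective: alternative algorithm; same asymptotic cost).


-- ===== PORT A =====
-- each helper is one '# …' block of A, literally (A recomputes content.lower() at every test)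
def aCloudflare (content : String) (techniques : PySem.Dict String (List String)) :
    PySem.Dict String (List String) :=
  if (["cloudflare", "cf-", "challenge"].any
      (fun kw => PySem.Str.isIn kw (PySem.Str.lower content))) then
    let cf_techs : List String := []
    let cf_techs := if PySem.Str.isIn "cloudscraper" (PySem.Str.lower content) then
      cf_techs ++ ["CloudScraper library"] else cf_techs
    let cf_techs := if PySem.Str.isIn "undetected" (PySem.Str.lower content) then
      cf_techs ++ ["Undetected ChromeDriver"] else cf_techs
    let cf_techs := if PySem.Str.isIn "tls" (PySem.Str.lower content) &&
        PySem.Str.isIn "fingerprint" (PySem.Str.lower content) then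
      cf_techs ++ ["TLS fingerprint spoofing"] else cf_techs
    if cf_techs ≠ [] then techniques.insert "cloudflare_bypass" cf_techs else techniques
  else techniques

def aBot (content : String) (techniques : PySem.Dict String (List String)) :
    PySem.Dict String (List String) :=
  if (["bot detection", "anti-bot", "fingerprint"].any
      (fun kw => PySem.Str.isIn kw (PySem.Str.lower content))) then
    let bot_techs : List String := []
    let bot_techs := if PySem.Str.isIn "user-agent" (PySem.Str.lower content) then
      bot_techs ++ ["User-Agent rotation"] else bot_techs
    let bot_techs := if PySem.Str.isIn "headless" (PySem.Str.lower content) then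
      bot_techs ++ ["Headless detection bypass"] else bot_techs
    let bot_techs := if PySem.Str.isIn "webdriver" (PySem.Str.lower content) then
      bot_techs ++ ["WebDriver property hiding"] else bot_techs
    if bot_techs ≠ [] then techniques.insert "bot_detection_bypass" bot_techs else techniques
  else techniques

def aProxy (content : String) (techniques : PySem.Dict String (List String)) :
    PySem.Dict String (List String) :=
  if PySem.Str.isIn "proxy" (PySem.Str.lower content) then
    let proxy_techs : List String := []
    let proxy_techs := if PySem.Str.isIn "residential" (PySem.Str.lower content) then
      proxy_techs ++ ["Residential proxies"] else proxy_techs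
    let proxy_techs := if PySem.Str.isIn "rotation" (PySem.Str.lower content) then
      proxy_techs ++ ["Proxy rotation"] else proxy_techs
    let proxy_techs := if PySem.Str.isIn "tor" (PySem.Str.lower content) then
      proxy_techs ++ ["TOR network"] else proxy_techs
    if proxy_techs ≠ [] then techniques.insert "proxy_methods" proxy_techs else techniques
  else techniques

def aCaptcha (content : String) (techniques : PySem.Dict String (List String)) :
    PySem.Dict String (List String) :=
  if PySem.Str.isIn "captcha" (PySem.Str.lower content) then
    let captcha_techs : List String := []
    let captcha_techs := if PySem.Str.isIn "2captcha" (PySem.Str.lower content) ||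
        PySem.Str.isIn "anticaptcha" (PySem.Str.lower content) then
      captcha_techs ++ ["CAPTCHA solving services"] else captcha_techs
    let captcha_techs := if PySem.Str.isIn "recaptcha" (PySem.Str.lower content) then
      captcha_techs ++ ["reCAPTCHA bypass"] else captcha_techs
    if captcha_techs ≠ [] then techniques.insert "captcha_solving" captcha_techs else techniques
  else techniques

def extract_techniques (content : String) : List (String × List String) :=
  let techniques : PySem.Dict String (List String) := PySem.Dict.empty
  let techniques := aCloudflare content techniques
  let techniques := aBot content techniques
  let techniques := aProxy content techniques
  let techniques := aCaptcha content techniques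
  techniques.items

-- ===== PORT B =====
-- _KEYWORDS of Source B
def pvKeywords : List String :=
  ["cloudflare", "cf-", "challenge", "cloudscraper", "undetected", "tls", "fingerprint",
   "bot detection", "anti-bot", "user-agent", "headless", "webdriver", "proxy",
   "residential", "rotation", "tor", "captcha", "2captcha", "anticaptcha", "recaptcha"]

-- _RULES of Source B: (key, gate keywords, rules as (label, CNF keyword groups))
def pvRules : List (String × List String × List (String × List (List String))) :=
  [("cloudflare_bypass", ["cloudflare", "cf-", "challenge"],
     [("CloudScraper library", [["cloudscraper"]]),
      ("Undetected ChromeDriver", [["undetected"]]),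
      ("TLS fingerprint spoofing", [["tls"], ["fingerprint"]])]),
   ("bot_detection_bypass", ["bot detection", "anti-bot", "fingerprint"],
     [("User-Agent rotation", [["user-agent"]]),
      ("Headless detection bypass", [["headless"]]),
      ("WebDriver property hiding", [["webdriver"]])]),
   ("proxy_methods", ["proxy"],
     [("Residential proxies", [["residential"]]),
      ("Proxy rotation", [["rotation"]]),
      ("TOR network", [["tor"]])]),
   ("captcha_solving", ["captcha"],
     [("CAPTCHA solving services", [["2captcha", "anticaptcha"]]),
      ("reCAPTCHA bypass", [["recaptcha"]])])]

-- inner loop of Source B's sweep: all keywords tested at one position i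
-- (text.startswith(kw, i) with 0 ≤ i ≤ len(text) is exactly startswith on text.drop i)
def pvScanPos (text : List Char) (found : PySem.Set String) (i : Nat) : PySem.Set String :=
  pvKeywords.foldl (fun f kw =>
    if !PySem.Set.contains f kw && PySem.Chars.startswith (text.drop i) kw.toList
    then PySem.Set.add f kw else f) found

-- the sweep: for i in range(len(text) + 1)
def pvScan (text : List Char) : PySem.Set String :=
  (List.range (text.length + 1)).foldl (pvScanPos text) PySem.Set.empty

-- one iteration of Source B's assembly loop over the rule table
def bStep (found : PySem.Set String) (techniques : PySem.Dict String (List String))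
    (rule : String × List String × List (String × List (List String))) :
    PySem.Dict String (List String) :=
  let (key, gate, rules) := rule
  if gate.any (fun kw => PySem.Set.contains found kw) then
    let labels := (rules.filter
        (fun r => r.2.all (fun group => group.any
          (fun kw => PySem.Set.contains found kw)))).map Prod.fst
    if labels ≠ [] then techniques.insert key labels else techniques
  else techniques

def extract_techniques_alt (content : String) : List (String × List String) :=
  let text := (PySem.Str.lower content).toList
  let found := pvScan text
  (pvRules.foldl (bStep found) (PySem.Dict.empty : PySem.Dict String (List String))).items

-- ===== PRECONDITION & SPEC =====
def Spec_extract_techniques (content : String) (out : List (String × List String)) : Prop := out = extract_techniques_alt content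
instance (content : String) (out : List (String × List String)) : Decidable (Spec_extract_techniques content out) := by unfold Spec_extract_techniques; infer_instance

-- ===== CLAIM (what is proved, stated in full; the proofs are below) =====
def Claim_equal_extract_techniques : Prop := ∀ (content : String), Dom_extract_techniques content → Spec_extract_techniques content (extract_techniques content)

-- ===== LEMMAS AND PROOFS =====
-- membership after one conditional-add pass over a keyword list (inner loop shape of the sweep)
theorem pv_mem_foldl_if_add (P : String → Bool) :
    ∀ (kws : List String) (f : PySem.Set String) (kw : String),
    kw ∈ kws.foldl (fun f k => if !PySem.Set.contains f k && P k then PySem.Set.add f k else f) f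
      ↔ kw ∈ f ∨ (kw ∈ kws ∧ P kw = true)
  | [], f, kw => by simp
  | k :: rest, f, kw => by
    rw [List.foldl_cons]
    by_cases hc : PySem.Set.contains f k = true <;> by_cases hp : P k = true <;>
      have hcm := PySem.Set.contains_iff f k <;>
      simp only [hc, hp, Bool.not_true, Bool.not_false, Bool.true_and, Bool.false_and,
        Bool.and_true, Bool.and_false, if_true, if_false, Bool.true_eq_false, ite_false, ite_true,
        pv_mem_foldl_if_add P rest, PySem.Set.mem_add, List.mem_cons] <;>
      constructor <;> intro h <;> aesop

theorem pv_mem_scanPos (text : List Char) (i : Nat) (f : PySem.Set String) (kw : String) :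
    kw ∈ pvScanPos text f i ↔
      kw ∈ f ∨ (kw ∈ pvKeywords ∧ PySem.Chars.startswith (text.drop i) kw.toList = true) := by
  exact pv_mem_foldl_if_add (fun k => PySem.Chars.startswith (text.drop i) k.toList) pvKeywords f kw

theorem pv_mem_scan_aux (text : List Char) :
    ∀ (is : List Nat) (f : PySem.Set String) (kw : String),
    kw ∈ is.foldl (pvScanPos text) f ↔
      kw ∈ f ∨ (kw ∈ pvKeywords ∧ ∃ i ∈ is, PySem.Chars.startswith (text.drop i) kw.toList = true)
  | [], f, kw => by simp
  | i :: rest, f, kw => by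
    rw [List.foldl_cons, pv_mem_scan_aux text rest, pv_mem_scanPos]
    simp only [List.mem_cons]
    constructor <;> intro h <;> aesop

theorem pv_contains_scan (content : String) (kw : String)
    (hmem : kw ∈ pvKeywords) (hne : kw.toList ≠ []) :
    PySem.Set.contains (pvScan (PySem.Str.lower content).toList) kw
      = PySem.Str.isIn kw (PySem.Str.lower content) := by
  set text := (PySem.Str.lower content).toList with htext
  have h1 : kw ∈ pvScan text ↔ ∃ j, kw.toList <+: text.drop j := by
    rw [pvScan, pv_mem_scan_aux]
    simp only [PySem.Set.empty, List.not_mem_nil, false_or, List.mem_range]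
    constructor
    · rintro ⟨-, i, hi, hs⟩
      exact ⟨i, (PySem.Chars.startswith_iff _ _).1 hs⟩
    · rintro ⟨j, hj⟩
      refine ⟨hmem, j, ?_, (PySem.Chars.startswith_iff _ _).2 hj⟩
      by_contra hgt
      have : text.drop j = [] := List.drop_eq_nil_of_le (by omega)
      rw [this] at hj
      exact hne (List.prefix_nil.mp hj)
  rw [PySem.Str.isIn_eq, ← htext]
  cases hc : PySem.Chars.isIn kw.toList text
  · have := PySem.Chars.exists_prefix_drop_iff_isIn (sub := kw.toList) (s := text)
    simp only [hc] at this
    rw [Bool.eq_false_iff]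
    intro hco
    exact (by simpa [this] using h1.1 ((PySem.Set.contains_iff _ _).1 hco))
  · have := PySem.Chars.exists_prefix_drop_iff_isIn (sub := kw.toList) (s := text)
    simp only [hc] at this
    exact (PySem.Set.contains_iff _ _).2 (h1.2 (this.mpr trivial))

theorem pv_cf_eq (content : String) (d : PySem.Dict String (List String)) :
    bStep (pvScan (PySem.Str.lower content).toList) d
      ("cloudflare_bypass", ["cloudflare", "cf-", "challenge"],
        [("CloudScraper library", [["cloudscraper"]]),
         ("Undetected ChromeDriver", [["undetected"]]),
         ("TLS fingerprint spoofing", [["tls"], ["fingerprint"]])])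
      = aCloudflare content d := by
  have c0 := pv_contains_scan content "cloudflare" (by decide) (by decide)
  have c1 := pv_contains_scan content "cf-" (by decide) (by decide)
  have c2 := pv_contains_scan content "challenge" (by decide) (by decide)
  have c3 := pv_contains_scan content "cloudscraper" (by decide) (by decide)
  have c4 := pv_contains_scan content "undetected" (by decide) (by decide)
  have c5 := pv_contains_scan content "tls" (by decide) (by decide)
  have c6 := pv_contains_scan content "fingerprint" (by decide) (by decide)
  simp only [bStep, List.any_cons, List.any_nil, List.all_cons, List.all_nil,
    List.filter_cons, List.filter_nil, List.map, c0, c1, c2, c3, c4, c5, c6]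
  cases h0 : PySem.Str.isIn "cloudflare" (PySem.Str.lower content) <;>
  cases h1 : PySem.Str.isIn "cf-" (PySem.Str.lower content) <;>
  cases h2 : PySem.Str.isIn "challenge" (PySem.Str.lower content) <;>
  cases h3 : PySem.Str.isIn "cloudscraper" (PySem.Str.lower content) <;>
  cases h4 : PySem.Str.isIn "undetected" (PySem.Str.lower content) <;>
  cases h5 : PySem.Str.isIn "tls" (PySem.Str.lower content) <;>
  cases h6 : PySem.Str.isIn "fingerprint" (PySem.Str.lower content) <;>
    simp_all [aCloudflare]

theorem pv_bot_eq (content : String) (d : PySem.Dict String (List String)) :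
    bStep (pvScan (PySem.Str.lower content).toList) d
      ("bot_detection_bypass", ["bot detection", "anti-bot", "fingerprint"],
        [("User-Agent rotation", [["user-agent"]]),
         ("Headless detection bypass", [["headless"]]),
         ("WebDriver property hiding", [["webdriver"]])])
      = aBot content d := by
  have c0 := pv_contains_scan content "bot detection" (by decide) (by decide)
  have c1 := pv_contains_scan content "anti-bot" (by decide) (by decide)
  have c2 := pv_contains_scan content "fingerprint" (by decide) (by decide)
  have c3 := pv_contains_scan content "user-agent" (by decide) (by decide)
  have c4 := pv_contains_scan content "headless" (by decide) (by decide)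
  have c5 := pv_contains_scan content "webdriver" (by decide) (by decide)
  simp only [bStep, List.any_cons, List.any_nil, List.all_cons, List.all_nil,
    List.filter_cons, List.filter_nil, List.map, c0, c1, c2, c3, c4, c5]
  cases h0 : PySem.Str.isIn "bot detection" (PySem.Str.lower content) <;>
  cases h1 : PySem.Str.isIn "anti-bot" (PySem.Str.lower content) <;>
  cases h2 : PySem.Str.isIn "fingerprint" (PySem.Str.lower content) <;>
  cases h3 : PySem.Str.isIn "user-agent" (PySem.Str.lower content) <;>
  cases h4 : PySem.Str.isIn "headless" (PySem.Str.lower content) <;>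
  cases h5 : PySem.Str.isIn "webdriver" (PySem.Str.lower content) <;>
    simp_all [aBot]

theorem pv_proxy_eq (content : String) (d : PySem.Dict String (List String)) :
    bStep (pvScan (PySem.Str.lower content).toList) d
      ("proxy_methods", ["proxy"],
        [("Residential proxies", [["residential"]]),
         ("Proxy rotation", [["rotation"]]),
         ("TOR network", [["tor"]])])
      = aProxy content d := by
  have c0 := pv_contains_scan content "proxy" (by decide) (by decide)
  have c1 := pv_contains_scan content "residential" (by decide) (by decide)
  have c2 := pv_contains_scan content "rotation" (by decide) (by decide)
  have c3 := pv_contains_scan content "tor" (by decide) (by decide)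
  simp only [bStep, List.any_cons, List.any_nil, List.all_cons, List.all_nil,
    List.filter_cons, List.filter_nil, List.map, c0, c1, c2, c3]
  cases h0 : PySem.Str.isIn "proxy" (PySem.Str.lower content) <;>
  cases h1 : PySem.Str.isIn "residential" (PySem.Str.lower content) <;>
  cases h2 : PySem.Str.isIn "rotation" (PySem.Str.lower content) <;>
  cases h3 : PySem.Str.isIn "tor" (PySem.Str.lower content) <;>
    simp_all [aProxy]

theorem pv_captcha_eq (content : String) (d : PySem.Dict String (List String)) :
    bStep (pvScan (PySem.Str.lower content).toList) d
      ("captcha_solving", ["captcha"],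
        [("CAPTCHA solving services", [["2captcha", "anticaptcha"]]),
         ("reCAPTCHA bypass", [["recaptcha"]])])
      = aCaptcha content d := by
  have c0 := pv_contains_scan content "captcha" (by decide) (by decide)
  have c1 := pv_contains_scan content "2captcha" (by decide) (by decide)
  have c2 := pv_contains_scan content "anticaptcha" (by decide) (by decide)
  have c3 := pv_contains_scan content "recaptcha" (by decide) (by decide)
  simp only [bStep, List.any_cons, List.any_nil, List.all_cons, List.all_nil,
    List.filter_cons, List.filter_nil, List.map, c0, c1, c2, c3]
  cases h0 : PySem.Str.isIn "captcha" (PySem.Str.lower content) <;>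
  cases h1 : PySem.Str.isIn "2captcha" (PySem.Str.lower content) <;>
  cases h2 : PySem.Str.isIn "anticaptcha" (PySem.Str.lower content) <;>
  cases h3 : PySem.Str.isIn "recaptcha" (PySem.Str.lower content) <;>
    simp_all [aCaptcha]

-- ===== VERDICT (by name: the statement is the Claim_ definition above) =====
theorem extract_techniques_spec : Claim_equal_extract_techniques := by
  intro content _
  show extract_techniques content = extract_techniques_alt content
  simp only [extract_techniques, extract_techniques_alt, pvRules,
    List.foldl_cons, List.foldl_nil]
  rw [pv_cf_eq, pv_bot_eq, pv_proxy_eq, pv_captcha_eq]
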